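-- pv_equiv track=rewrite | github.com/cristinaimprota/Investigating-Training-Data-s-Role | 1_dataset_preprocessing_and_filtering/3_further_cleaning.py | clean_note
-- ===== SOURCE A (Python) =====
-- def clean_note(doc):
--     doc_lines = doc.split('\n')
--     cleaned_doc_lines = []
--     for line in doc_lines:
--         if line.lower().startswith('*note*'):
--             break
--         cleaned_doc_lines.append(line)
--     return '\n'.join(cleaned_doc_lines)
-- ===== SOURCE B (Python) =====
-- def clean_note(doc):
--     # Truncate the document at the first line that starts with '*note*'
--     # (case-insensitive), without building or scanning a list of lines:
--     # one lowercase pass, then a single substring search.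
--     low = doc.lower()
--     if low.startswith('*note*'):
--         return ''
--     i = low.find('\n*note*')
--     if i == -1:
--         return doc
--     return doc[:i]
-- ===== Notes on version B (the rewrite author's own statement) =====
-- stated objective: simpler
-- what changed: A splits the document into a line list, loops with a break collecting lines, and joins them back; B never builds a line list: one lowercase pass, one startswith test, one substring search for "\n*note*", and a single slice.
import Mathlib
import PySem

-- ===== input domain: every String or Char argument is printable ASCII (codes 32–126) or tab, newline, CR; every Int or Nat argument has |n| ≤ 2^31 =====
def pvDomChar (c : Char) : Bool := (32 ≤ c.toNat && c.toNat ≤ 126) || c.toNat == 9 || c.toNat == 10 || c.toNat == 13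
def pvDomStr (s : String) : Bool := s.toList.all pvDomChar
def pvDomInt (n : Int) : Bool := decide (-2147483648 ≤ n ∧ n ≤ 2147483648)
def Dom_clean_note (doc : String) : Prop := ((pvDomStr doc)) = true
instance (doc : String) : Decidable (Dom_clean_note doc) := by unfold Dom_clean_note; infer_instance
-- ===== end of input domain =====

-- B replaces A's split/loop/join over a line list by one lowercase pass and a single
-- substring search for a newline followed by the marker (a simpler, more idiomatic truncation; same return value).

-- ===== PORT A =====
-- A's for-loop with break: collect lines until one where line.lower().startswith('*note*')
def cleanNoteLoop : List String → List String
  | [] => []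
  | line :: rest =>
    if PySem.Str.startswith (PySem.Str.lower line) "*note*" then []
    else line :: cleanNoteLoop rest

def clean_note (doc : String) : String :=
  -- doc.split('\n'): the separator is the nonempty literal "\n", so split? never raises (getD is never taken)
  let doc_lines : List String := (PySem.Str.split? doc "\n").getD []
  PySem.Str.join "\n" (cleanNoteLoop doc_lines)

-- ===== PORT B =====
def clean_note_alt (doc : String) : String :=
  let low := PySem.Str.lower doc
  if PySem.Str.startswith low "*note*" then ""
  else
    let i := PySem.Str.find low "\n*note*"
    if i = -1 then doc
    else PySem.Str.slice doc none (some i)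

-- ===== PRECONDITION & SPEC =====
def Spec_clean_note (doc : String) (out : String) : Prop := out = clean_note_alt doc
instance (doc : String) (out : String) : Decidable (Spec_clean_note doc out) := by unfold Spec_clean_note; infer_instance

-- ===== CLAIM (what is proved, stated in full; the proofs are below) =====
def Claim_equal_clean_note : Prop := ∀ (doc : String), Dom_clean_note doc → Spec_clean_note doc (clean_note doc)

-- ===== LEMMAS AND PROOFS =====

lemma splitOn_go_eq (c : Char) :
    ∀ (fuel : Nat) (l cur : List Char) (acc : List (List Char)), l.length ≤ fuel →
      PySem.Chars.splitOn.go [c] fuel l cur acc =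
        acc.reverse ++ (l.splitOnP (· == c)).modifyHead (cur.reverse ++ ·) := by
  intro fuel
  induction fuel with
  | zero =>
    intro l cur acc hl
    have : l = [] := List.eq_nil_of_length_eq_zero (Nat.le_zero.mp hl)
    subst this
    simp [PySem.Chars.splitOn.go, List.splitOnP_nil]
  | succ n ih =>
    intro l cur acc hl
    cases l with
    | nil => simp [PySem.Chars.splitOn.go, List.splitOnP_nil]
    | cons x rest =>
      rw [PySem.Chars.splitOn.go]
      by_cases hx : x = c
      · subst hx
        have hpre : [x].isPrefixOf (x :: rest) = true := by simp [List.isPrefixOf]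
        simp only [hpre, if_true, List.length_singleton, List.drop_one, List.tail_cons]
        rw [ih rest [] ((cur.reverse) :: acc) (by simpa using Nat.le_of_succ_le_succ hl)]
        rcases h : (rest.splitOnP (fun y => y == x)) with _ | ⟨hd, tl⟩
        · exact absurd h (List.splitOnP_ne_nil _ _)
        · simp [List.splitOnP_cons, h]
      · have hpre : [c].isPrefixOf (x :: rest) = false := by
          simp only [List.isPrefixOf, Bool.and_eq_false_iff, beq_eq_false_iff_ne, ne_eq]
          exact Or.inl fun h => hx h.symm
        simp only [hpre]
        rw [ih rest (x :: cur) acc (by simpa using Nat.le_of_succ_le_succ hl)]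
        rw [List.splitOnP_cons]
        simp only [beq_iff_eq, hx, if_false]
        rcases h : (rest.splitOnP (· == c)) with _ | ⟨hd, tl⟩
        · exact absurd h (List.splitOnP_ne_nil _ _)
        · simp

lemma chars_splitOn_eq (cs : List Char) (c : Char) :
    PySem.Chars.splitOn cs [c] = cs.splitOn c := by
  rw [PySem.Chars.splitOn, splitOn_go_eq c (cs.length + 1) cs [] [] (by omega)]
  rcases h : (cs.splitOnP (· == c)) with _ | ⟨hd, tl⟩
  · exact absurd h (List.splitOnP_ne_nil _ _)
  · simp [List.splitOn, h]

lemma toNat_ofNat_lt (n : Nat) (h : n < 0xd800) : (Char.ofNat n).toNat = n := by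
  simp [Char.ofNat, Char.toNat, Char.ofNatAux, h, Nat.isValidChar]

lemma lowerChar_eq_newline {c : Char} (h : PySem.Chars.lowerChar c = '\n') : c = '\n' := by
  unfold PySem.Chars.lowerChar at h
  split_ifs at h with hu
  · exfalso
    simp only [PySem.Chars.isupper, Bool.and_eq_true, decide_eq_true_eq, Char.le_def] at hu
    have h65 : 65 ≤ c.toNat := hu.1
    have h90 : c.toNat ≤ 90 := hu.2
    have hv : (Char.ofNat (c.toNat + 32)).toNat = c.toNat + 32 :=
      toNat_ofNat_lt _ (by omega)
    have := congrArg Char.toNat h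
    rw [hv] at this
    have h10 : ('\n').toNat = 10 := by decide
    omega
  · exact h

lemma newline_not_mem_lower {cs : List Char} (h : '\n' ∉ cs) : '\n' ∉ PySem.Chars.lower cs := by
  intro hmem
  rw [PySem.Chars.lower, List.mem_map] at hmem
  obtain ⟨c, hc, hlc⟩ := hmem
  exact h (lowerChar_eq_newline hlc ▸ hc)

lemma splitOn_of_not_mem {cs : List Char} (h : '\n' ∉ cs) : cs.splitOn '\n' = [cs] := by
  induction cs with
  | nil => simp [List.splitOn, List.splitOnP_nil]
  | cons x rest ih =>
    have hx : ¬ (x = '\n') := fun hh => h (hh ▸ List.mem_cons_self)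
    have hrest := ih (fun hh => h (List.mem_cons_of_mem _ hh))
    simp only [List.splitOn] at hrest ⊢
    rw [List.splitOnP_cons, hrest]
    simp [hx]

lemma splitOn_append_cons {la : List Char} (rest : List Char) (h : '\n' ∉ la) :
    (la ++ '\n' :: rest).splitOn '\n' = la :: rest.splitOn '\n' := by
  induction la with
  | nil => simp [List.splitOn, List.splitOnP_cons]
  | cons x la' ih =>
    have hx : ¬ (x = '\n') := fun hh => h (hh ▸ List.mem_cons_self)
    have h' := ih (fun hh => h (List.mem_cons_of_mem _ hh))
    simp only [List.splitOn] at h' ⊢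
    rw [List.cons_append, List.splitOnP_cons, h']
    simp [hx]

lemma prefix_append_cons {α : Type} {m u v : List α} {c : α}
    (h : m <+: u ++ c :: v) (hc : c ∉ m) : m <+: u := by
  induction u generalizing m with
  | nil =>
    cases m with
    | nil => exact List.nil_prefix
    | cons x m' =>
      rw [List.nil_append, List.cons_prefix_cons] at h
      exact absurd (h.1 ▸ List.mem_cons_self) hc
  | cons y u' ih =>
    cases m with
    | nil => exact List.nil_prefix
    | cons x m' =>
      rw [List.cons_append, List.cons_prefix_cons] at h
      rw [h.1]
      exact List.cons_prefix_cons.mpr ⟨rfl, ih h.2 (fun hh => hc (List.mem_cons_of_mem _ hh))⟩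

def mChars : List Char := ['*', 'n', 'o', 't', 'e', '*']

lemma find_eq_of_first {s sub : List Char} {p : Nat}
    (h1 : sub <+: s.drop p) (h2 : ∀ i < p, ¬ sub <+: s.drop i) :
    PySem.Chars.find s sub = (p : Int) := by
  have hin : PySem.Chars.isIn sub s = true :=
    (PySem.Chars.exists_prefix_drop_iff_isIn sub s).mp ⟨p, h1⟩
  have hnn : 0 ≤ PySem.Chars.find s sub :=
    (PySem.Chars.find_nonneg_iff s sub).mpr ((PySem.Chars.isIn_iff_infix sub s).mp hin)
  obtain ⟨hocc, hmin⟩ := PySem.Chars.find_spec hnn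
  have hle : (PySem.Chars.find s sub).toNat ≤ p := by
    by_contra hgt
    exact hmin p (by omega) h1
  have hge : p ≤ (PySem.Chars.find s sub).toNat := by
    by_contra hgt
    exact h2 _ (by omega) hocc
  omega

lemma find_eq_neg_one_of {s sub : List Char} (h : ∀ j, ¬ sub <+: s.drop j) :
    PySem.Chars.find s sub = -1 := by
  rw [PySem.Chars.find_eq_neg_one_iff]
  intro hinf
  obtain ⟨j, hj⟩ := (PySem.Chars.exists_prefix_drop_iff_isIn sub s).mpr
    ((PySem.Chars.isIn_iff_infix sub s).mpr hinf)
  exact h j hj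

lemma marker_first_line (la rest : List Char) :
    (mChars <+: PySem.Chars.lower la ↔ mChars <+: PySem.Chars.lower (la ++ '\n' :: rest)) := by
  have hsplit : PySem.Chars.lower (la ++ '\n' :: rest)
      = PySem.Chars.lower la ++ '\n' :: PySem.Chars.lower rest := by
    simp [PySem.Chars.lower]
    decide
  constructor
  · intro hp
    rw [hsplit]
    exact hp.trans (List.prefix_append _ _)
  · intro hp
    rw [hsplit] at hp
    exact prefix_append_cons hp (by decide)

def cleanA : List (List Char) → List (List Char)
  | [] => []
  | l :: rest =>
    if PySem.Chars.startswith (PySem.Chars.lower l) mChars then []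
    else l :: cleanA rest

def aChars (cs : List Char) : List Char :=
  PySem.Chars.join ['\n'] (cleanA (cs.splitOn '\n'))

def bChars (cs : List Char) : List Char :=
  let low := PySem.Chars.lower cs
  if PySem.Chars.startswith low mChars then []
  else if PySem.Chars.find low ('\n' :: mChars) = -1 then cs
  else cs.take (PySem.Chars.find low ('\n' :: mChars)).toNat

-- decompose a list at its first newline
lemma first_newline_decomp {cs : List Char} (h : '\n' ∈ cs) :
    ∃ la rest, cs = la ++ '\n' :: rest ∧ '\n' ∉ la := by
  refine ⟨cs.takeWhile (· ≠ '\n'), (cs.dropWhile (· ≠ '\n')).tail, ?_, ?_⟩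
  · have hnil : cs.dropWhile (· ≠ '\n') ≠ [] := by
      intro hn
      have := (List.dropWhile_eq_nil_iff).mp hn
      simp at this
      exact (this _ h) rfl
    have hh := List.head_dropWhile_not (fun x => decide (x ≠ '\n')) hnil
    have hhead : (cs.dropWhile (fun x => decide (x ≠ '\n'))).head hnil = '\n' := by
      by_contra hne
      rw [decide_eq_false_iff_not] at hh
      exact hh hne
    conv_lhs => rw [← List.takeWhile_append_dropWhile (p := fun x => decide (x ≠ '\n')) (l := cs)]
    congr 1
    conv_lhs => rw [← List.cons_head_tail hnil]
    rw [hhead]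
  · intro hmem
    have := List.mem_takeWhile_imp hmem
    simp at this

lemma cleanA_eq_nil_iff (cs : List Char) :
    cleanA (cs.splitOn '\n') = [] ↔ mChars <+: PySem.Chars.lower cs := by
  by_cases h : '\n' ∈ cs
  · obtain ⟨la, rest, hcs, hla⟩ := first_newline_decomp h
    subst hcs
    rw [splitOn_append_cons rest hla]
    rw [cleanA]
    rw [← marker_first_line la rest, ← PySem.Chars.startswith_iff]
    split_ifs with hs
    · simpa using hs
    · simp [hs]
  · rw [splitOn_of_not_mem h, cleanA, ← PySem.Chars.startswith_iff]
    split_ifs with hs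
    · simpa using hs
    · simp [hs]

lemma occ_nonl {w : List Char} (hw : '\n' ∉ w) (j : Nat) : ¬ ('\n' :: mChars) <+: w.drop j :=
  fun h => hw (List.drop_subset j w (h.subset List.mem_cons_self))

lemma occ_split {u v : List Char} (hu : '\n' ∉ u) (j : Nat) :
    (('\n' :: mChars) <+: (u ++ '\n' :: v).drop j ↔
      (j = u.length ∧ mChars <+: v) ∨
      (u.length + 1 ≤ j ∧ ('\n' :: mChars) <+: v.drop (j - (u.length + 1)))) := by
  rw [List.drop_append]
  rcases Nat.lt_trichotomy j u.length with hj | hj | hj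
  · constructor
    · intro h
      exfalso
      rw [List.drop_eq_getElem_cons hj] at h
      rw [List.cons_append, List.cons_prefix_cons] at h
      exact hu (h.1 ▸ List.getElem_mem hj)
    · rintro (⟨h1, _⟩ | ⟨h1, _⟩) <;> omega
  · subst hj
    rw [List.drop_length, Nat.sub_self, List.drop_zero, List.nil_append,
      List.cons_prefix_cons]
    constructor
    · intro h; exact Or.inl ⟨rfl, h.2⟩
    · rintro (⟨_, h2⟩ | ⟨h1, _⟩)
      · exact ⟨rfl, h2⟩
      · omega
  · rw [List.drop_eq_nil_of_le (by omega), List.nil_append]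
    have hk : j - u.length = (j - (u.length + 1)) + 1 := by omega
    rw [hk, List.drop_succ_cons]
    constructor
    · intro h; exact Or.inr ⟨by omega, h⟩
    · rintro (⟨h1, _⟩ | ⟨_, h2⟩)
      · omega
      · exact h2

lemma lower_split (la rest : List Char) :
    PySem.Chars.lower (la ++ '\n' :: rest) =
      PySem.Chars.lower la ++ '\n' :: PySem.Chars.lower rest := by
  simp [PySem.Chars.lower]
  decide

lemma lower_length (l : List Char) : (PySem.Chars.lower l).length = l.length := by
  simp [PySem.Chars.lower]

lemma no_occ_of_find_neg {s sub : List Char} (hf : PySem.Chars.find s sub = -1) (j : Nat) :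
    ¬ sub <+: s.drop j := fun h =>
  (PySem.Chars.find_eq_neg_one_iff s sub).mp hf
    ((PySem.Chars.isIn_iff_infix sub s).mp
      ((PySem.Chars.exists_prefix_drop_iff_isIn sub s).mp ⟨j, h⟩))

lemma aChars_eq_bChars_aux : ∀ (n : Nat) (cs : List Char), cs.length ≤ n → aChars cs = bChars cs := by
  intro n
  induction n with
  | zero =>
    intro cs hlen
    have : cs = [] := List.eq_nil_of_length_eq_zero (Nat.le_zero.mp hlen)
    subst this
    decide
  | succ k ih =>
    intro cs hlen
    by_cases hnl : '\n' ∈ cs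
    · obtain ⟨la, rest, rfl, hla⟩ := first_newline_decomp hnl
      have hnla : '\n' ∉ PySem.Chars.lower la := newline_not_mem_lower hla
      have hlow := lower_split la rest
      unfold aChars bChars
      rw [splitOn_append_cons rest hla, cleanA, hlow]
      by_cases hs : mChars <+: PySem.Chars.lower la
      · rw [if_pos ((PySem.Chars.startswith_iff _ _).mpr hs),
          if_pos ((PySem.Chars.startswith_iff _ _).mpr
            (hs.trans (List.prefix_append _ _)))]
        exact PySem.Chars.join_nil _
      · have hs2 : ¬ mChars <+: (PySem.Chars.lower la ++ '\n' :: PySem.Chars.lower rest) := by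
          intro h
          exact hs (prefix_append_cons h (by decide))
        rw [if_neg (by rw [PySem.Chars.startswith_iff]; exact hs),
          if_neg (by rw [PySem.Chars.startswith_iff]; exact hs2)]
        have hrec : aChars rest = bChars rest :=
          ih rest (by rw [List.length_append, List.length_cons] at hlen; omega)
        by_cases hrest : mChars <+: PySem.Chars.lower rest
        · -- the marker line is the line right after the first newline: find hits la.length
          rw [(cleanA_eq_nil_iff rest).mpr hrest]
          have hfind : PySem.Chars.find
              (PySem.Chars.lower la ++ '\n' :: PySem.Chars.lower rest) ('\n' :: mChars)
              = (la.length : Int) := by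
            apply find_eq_of_first (p := la.length)
            · rw [occ_split hnla]
              exact Or.inl ⟨(lower_length la).symm, hrest⟩
            · intro i hi
              rw [occ_split hnla, lower_length]
              rintro (⟨h1, _⟩ | ⟨h1, _⟩) <;> omega
          rw [hfind]
          rw [if_neg (by omega)]
          simp only [Int.toNat_natCast]
          rw [List.take_left]
          exact PySem.Chars.join_singleton _ _
        · -- no marker line yet: peel the first line on both sides and recurse
          rcases hq : cleanA (rest.splitOn '\n') with _ | ⟨q, L'⟩
          · exact absurd ((cleanA_eq_nil_iff rest).mp hq) hrest
          have hjoin : PySem.Chars.join ['\n'] (la :: q :: L')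
              = la ++ '\n' :: PySem.Chars.join ['\n'] (q :: L') := by
            rw [PySem.Chars.join_cons_cons]
            simp
          rw [hjoin]
          have hA : PySem.Chars.join ['\n'] (q :: L') = aChars rest := by
            rw [aChars, hq]
          rw [hA, hrec]
          have hsr : ¬ (PySem.Chars.startswith (PySem.Chars.lower rest) mChars = true) := by
            rw [PySem.Chars.startswith_iff]; exact hrest
          by_cases hf : PySem.Chars.find (PySem.Chars.lower rest) ('\n' :: mChars) = -1
          · have hfind : PySem.Chars.find
                (PySem.Chars.lower la ++ '\n' :: PySem.Chars.lower rest) ('\n' :: mChars) = -1 := by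
              apply find_eq_neg_one_of
              intro j
              rw [occ_split hnla]
              rintro (⟨_, h2⟩ | ⟨_, h2⟩)
              · exact hrest h2
              · exact no_occ_of_find_neg hf _ h2
            rw [if_pos hfind]
            have hb : bChars rest = rest := by
              rw [bChars]
              rw [if_neg hsr, if_pos hf]
            rw [hb]
          · have hnn : 0 ≤ PySem.Chars.find (PySem.Chars.lower rest) ('\n' :: mChars) := by
              have := PySem.Chars.neg_one_le_find (PySem.Chars.lower rest) ('\n' :: mChars)
              omega
            obtain ⟨hocc, hmin⟩ := PySem.Chars.find_spec hnn
            set i := (PySem.Chars.find (PySem.Chars.lower rest) ('\n' :: mChars)).toNat with hi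
            have hfind : PySem.Chars.find
                (PySem.Chars.lower la ++ '\n' :: PySem.Chars.lower rest) ('\n' :: mChars)
                = ((la.length + 1 + i : Nat) : Int) := by
              apply find_eq_of_first
              · rw [occ_split hnla, lower_length]
                exact Or.inr ⟨by omega, by
                  have : la.length + 1 + i - (la.length + 1) = i := by omega
                  rw [this]; exact hocc⟩
              · intro j hj
                rw [occ_split hnla, lower_length]
                rintro (⟨_, h2⟩ | ⟨h1, h2⟩)
                · exact hrest h2
                · exact hmin _ (by omega) h2
            rw [hfind, if_neg (by omega)]
            have hb : bChars rest = rest.take i := by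
              rw [bChars]
              rw [if_neg hsr, if_neg hf, hi]
            rw [hb]
            simp only [Int.toNat_natCast]
            rw [List.take_append]
            rw [List.take_of_length_le (show la.length ≤ la.length + 1 + i by omega)]
            congr 1
            have h1 : la.length + 1 + i - la.length = i + 1 := by omega
            rw [h1]
            simp [List.take_succ_cons]
    · have hsp := splitOn_of_not_mem hnl
      have hnll := newline_not_mem_lower hnl
      unfold aChars bChars
      rw [hsp, cleanA]
      by_cases hs : PySem.Chars.startswith (PySem.Chars.lower cs) mChars
      · rw [if_pos hs, if_pos hs]
        exact PySem.Chars.join_nil _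
      · rw [if_neg hs, if_neg hs,
          if_pos (find_eq_neg_one_of (occ_nonl hnll))]
        exact PySem.Chars.join_singleton _ _

lemma loop_bridge : ∀ ls : List (List Char),
    List.map String.toList (cleanNoteLoop (ls.map String.ofList)) = cleanA ls := by
  intro ls
  induction ls with
  | nil => rfl
  | cons l rest ih =>
    rw [List.map_cons, cleanNoteLoop, cleanA]
    have hc : PySem.Str.startswith (PySem.Str.lower (String.ofList l)) "*note*"
        = PySem.Chars.startswith (PySem.Chars.lower l) mChars := by
      rw [PySem.Str.startswith_eq, PySem.Str.toList_lower]
      simp [mChars]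
    rw [hc]
    split_ifs with h
    · rfl
    · rw [List.map_cons, ih]
      simp

lemma clean_note_toList (doc : String) : (clean_note doc).toList = aChars doc.toList := by
  have hsplit : (PySem.Str.split? doc "\n").getD []
      = (PySem.Chars.splitOn doc.toList ['\n']).map String.ofList := rfl
  rw [clean_note]
  rw [hsplit, PySem.Str.toList_join, loop_bridge, chars_splitOn_eq, aChars]
  rfl

lemma clean_note_alt_toList (doc : String) : (clean_note_alt doc).toList = bChars doc.toList := by
  rw [clean_note_alt, bChars]
  have hm : ("*note*" : String).toList = mChars := rfl
  have hsub : ("\n*note*" : String).toList = '\n' :: mChars := rfl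
  have hc1 : PySem.Str.startswith (PySem.Str.lower doc) "*note*"
      = PySem.Chars.startswith (PySem.Chars.lower doc.toList) mChars := by
    rw [PySem.Str.startswith_eq, PySem.Str.toList_lower, hm]
  have hc2 : PySem.Str.find (PySem.Str.lower doc) "\n*note*"
      = PySem.Chars.find (PySem.Chars.lower doc.toList) ('\n' :: mChars) := by
    rw [PySem.Str.find_eq, PySem.Str.toList_lower, hsub]
  simp only [hc1, hc2]
  split_ifs with h1 h2
  · rfl
  · rfl
  · have hnn : 0 ≤ PySem.Chars.find (PySem.Chars.lower doc.toList) ('\n' :: mChars) := by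
      have := PySem.Chars.neg_one_le_find (PySem.Chars.lower doc.toList) ('\n' :: mChars)
      omega
    rw [PySem.Str.toList_slice, PySem.Chars.slice_eq_listSlice, PySem.List.slice_to doc.toList hnn]

lemma aChars_eq_bChars (cs : List Char) : aChars cs = bChars cs :=
  aChars_eq_bChars_aux cs.length cs le_rfl


-- ===== VERDICT (by name: the statement is the Claim_ definition above) =====
theorem clean_note_spec : Claim_equal_clean_note := by
  intro doc _
  unfold Spec_clean_note
  apply String.toList_inj.mp
  rw [clean_note_toList, clean_note_alt_toList, aChars_eq_bChars]
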